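-- pv_equiv track=rewrite | github.com/leyulv-wang/long_memory_agent | agent/context_builder.py | _extract_query_entities
-- ===== SOURCE A (Python) =====
-- from typing import List, Tuple, Dict, Any, Optional
--
-- def _extract_query_entities(query: str) -> List[str]:
--     if not query:
--         return []
--     stop_words = {
--         "what", "where", "when", "which", "who", "how", "why",
--         "the", "a", "an", "is", "are", "was", "were", "do", "does", "did",
--         "i", "you", "he", "she", "it", "we", "they", "my", "your", "his", "her",
--         "this", "that", "these", "those", "in", "on", "at", "to", "for", "of",
--         "and", "or", "but", "not", "with", "from", "by", "about",
--         "first", "last", "before", "after", "many", "much", "all", "any",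
--         "tell", "show", "give", "find", "get", "list", "describe", "explain",
--     }
--     title_prefixes = {"dr.", "mr.", "mrs.", "ms.", "prof.", "dr", "mr", "mrs", "ms", "prof"}
--     words = query.split()
--     entities = []
--     current_entity = []
--     for word in words:
--         word_lower = word.lower().rstrip(",?!;:'\"()[]")
--         if word_lower in title_prefixes:
--             if word_lower.endswith('.'):
--                 current_entity.append(word_lower.capitalize())
--             else:
--                 current_entity.append(word_lower.capitalize() + ".")
--             continue
--         clean_word = word.strip(",?!;:'\"()[]")
--         if clean_word.endswith('.') and clean_word.lower() not in title_prefixes: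
--             clean_word = clean_word.rstrip('.')
--         if clean_word and clean_word[0].isupper() and clean_word.lower() not in stop_words:
--             current_entity.append(clean_word)
--         else:
--             if current_entity:
--                 entity = " ".join(current_entity)
--                 if len(entity) > 1:
--                     entities.append(entity)
--                 current_entity = []
--     if current_entity:
--         entity = " ".join(current_entity)
--         if len(entity) > 1:
--             entities.append(entity)
--     return entities
-- ===== SOURCE B (Python) =====
-- def _extract_query_entities(query):
--     stop_words = {
--         "what", "where", "when", "which", "who", "how", "why",
--         "the", "a", "an", "is", "are", "was", "were", "do", "does", "did",
--         "i", "you", "he", "she", "it", "we", "they", "my", "your", "his", "her",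
--         "this", "that", "these", "those", "in", "on", "at", "to", "for", "of",
--         "and", "or", "but", "not", "with", "from", "by", "about",
--         "first", "last", "before", "after", "many", "much", "all", "any",
--         "tell", "show", "give", "find", "get", "list", "describe", "explain",
--     }
--     title_prefixes = {"dr.", "mr.", "mrs.", "ms.", "prof.", "dr", "mr", "mrs", "ms", "prof"}
--
--     def token(word):
--         # the cleaned entity token for this word, or a newline sentinel at a boundary
--         word_lower = word.lower().rstrip(",?!;:'\"()[]")
--         if word_lower in title_prefixes:
--             if word_lower.endswith('.'):
--                 return word_lower.capitalize()
--             return word_lower.capitalize() + "."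
--         clean = word.strip(",?!;:'\"()[]")
--         if clean.endswith('.') and clean.lower() not in title_prefixes:
--             clean = clean.rstrip('.')
--         if clean and clean[0].isupper() and clean.lower() not in stop_words:
--             return clean
--         return "\n"
--
--     # Rebuild the query as one flat string: entity tokens separated by spaces,
--     # rejected words marked by "\n".  Maximal entity runs are then exactly the
--     # newline-delimited segments (up to surrounding spaces).
--     text = " ".join(token(w) for w in query.split())
--     entities = []
--     for segment in text.split("\n"):
--         entity = segment.strip(" ")
--         if len(entity) > 1:
--             entities.append(entity)
--     return entities
-- ===== Notes on version B (the rewrite author's own statement) =====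
-- stated objective: alternative
-- what changed: A's single stateful loop with a current_entity run buffer and inline flushes is replaced by a sentinel-string reconstruction: every word is mapped to its cleaned token or a newline sentinel, the tokens are joined into one flat space-separated string, and the entity runs are recovered by splitting that string on newlines and stripping spaces, keeping segments of length > 1.
import Mathlib
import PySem

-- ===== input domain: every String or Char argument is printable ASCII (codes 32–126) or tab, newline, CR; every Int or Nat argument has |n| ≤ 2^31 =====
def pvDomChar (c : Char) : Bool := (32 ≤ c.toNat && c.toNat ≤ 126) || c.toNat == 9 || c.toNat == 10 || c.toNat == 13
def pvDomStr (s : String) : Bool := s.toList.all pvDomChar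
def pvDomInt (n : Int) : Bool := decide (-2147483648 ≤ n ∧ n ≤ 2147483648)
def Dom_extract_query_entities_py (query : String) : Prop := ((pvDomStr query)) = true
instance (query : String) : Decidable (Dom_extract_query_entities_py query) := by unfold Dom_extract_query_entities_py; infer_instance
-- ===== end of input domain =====

-- B replaces A's stateful run-buffer loop by a sentinel-string reconstruction: map each word to
-- its cleaned token or a "\n" sentinel, join everything with spaces into one flat string, then
-- split that string on "\n" and strip spaces to recover the entity runs; objective: alternative.

-- shared string constants of both Pythons
def pvPunct : List Char := (",?!;:'\"()[]").toList
def pvStopWords : List (List Char) :=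
  ["what", "where", "when", "which", "who", "how", "why",
   "the", "a", "an", "is", "are", "was", "were", "do", "does", "did",
   "i", "you", "he", "she", "it", "we", "they", "my", "your", "his", "her",
   "this", "that", "these", "those", "in", "on", "at", "to", "for", "of",
   "and", "or", "but", "not", "with", "from", "by", "about",
   "first", "last", "before", "after", "many", "much", "all", "any",
   "tell", "show", "give", "find", "get", "list", "describe", "explain"].map String.toList
def pvTitlePrefixes : List (List Char) :=
  ["dr.", "mr.", "mrs.", "ms.", "prof.", "dr", "mr", "mrs", "ms", "prof"].map String.toList

-- hand port of str.rstrip(chars) (exact: drop trailing chars that are in the set)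
def pvRstripChars (cs chars : List Char) : List Char := (cs.reverse.dropWhile (· ∈ chars)).reverse
-- hand port of str.capitalize (exact on ASCII: upper-case first char, lower-case the rest)
def pvCapitalize (cs : List Char) : List Char :=
  match cs with
  | [] => []
  | c :: t => PySem.Chars.upperChar c :: PySem.Chars.lower t

-- ===== PORT A =====
-- the body of A's 'for word in words' loop, transliterated
def pvStepA (st : List String × List (List Char)) (word : List Char) : List String × List (List Char) :=
  let word_lower := pvRstripChars (PySem.Chars.lower word) pvPunct
  if word_lower ∈ pvTitlePrefixes then
    if PySem.Chars.endswith word_lower ['.'] then (st.1, st.2 ++ [pvCapitalize word_lower])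
    else (st.1, st.2 ++ [pvCapitalize word_lower ++ ['.']])
  else
    let clean0 := PySem.Chars.stripChars word pvPunct
    let clean_word :=
      if PySem.Chars.endswith clean0 ['.'] ∧ PySem.Chars.lower clean0 ∉ pvTitlePrefixes then
        pvRstripChars clean0 ['.']
      else clean0
    if clean_word ≠ [] ∧ PySem.Chars.isupper (clean_word.headD ' ') = true ∧
        PySem.Chars.lower clean_word ∉ pvStopWords then
      (st.1, st.2 ++ [clean_word])
    else if st.2 ≠ [] then
      (let entity := PySem.Chars.join [' '] st.2
       if 1 < entity.length then st.1 ++ [String.ofList entity] else st.1, [])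
    else (st.1, [])

def extract_query_entities_py (query : String) : List String :=
  if query.toList = [] then []
  else
    let words := PySem.Chars.split₀ query.toList
    let fin := words.foldl pvStepA ([], [])
    if fin.2 ≠ [] then
      let entity := PySem.Chars.join [' '] fin.2
      if 1 < entity.length then fin.1 ++ [String.ofList entity] else fin.1
    else fin.1

-- ===== PORT B =====
-- Source B's 'token': the cleaned entity token for this word, or the "\n" sentinel at a boundary
def pvTokB (word : List Char) : List Char :=
  let word_lower := pvRstripChars (PySem.Chars.lower word) pvPunct
  if word_lower ∈ pvTitlePrefixes then
    if PySem.Chars.endswith word_lower ['.'] then pvCapitalize word_lower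
    else pvCapitalize word_lower ++ ['.']
  else
    let clean0 := PySem.Chars.stripChars word pvPunct
    let clean :=
      if PySem.Chars.endswith clean0 ['.'] ∧ PySem.Chars.lower clean0 ∉ pvTitlePrefixes then
        pvRstripChars clean0 ['.']
      else clean0
    if clean ≠ [] ∧ PySem.Chars.isupper (clean.headD ' ') = true ∧
        PySem.Chars.lower clean ∉ pvStopWords then clean
    else ['\n']

-- the body of Source B's 'for segment in text.split("\n")' loop: kept segment, or dropped
def pvSegF (seg : List Char) : Option String :=
  let entity := PySem.Chars.stripChars seg [' ']
  if 1 < entity.length then some (String.ofList entity) else none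

def extract_query_entities_py_alt (query : String) : List String :=
  let text := PySem.Chars.join [' '] ((PySem.Chars.split₀ query.toList).map pvTokB)
  (PySem.Chars.splitOn text ['\n']).filterMap pvSegF

-- ===== PRECONDITION & SPEC =====
def Spec_extract_query_entities_py (query : String) (out : List String) : Prop := out = extract_query_entities_py_alt query
instance (query : String) (out : List String) : Decidable (Spec_extract_query_entities_py query out) := by unfold Spec_extract_query_entities_py; infer_instance

-- ===== CLAIM (what is proved, stated in full; the proofs are below) =====
def Claim_equal_extract_query_entities_py : Prop := ∀ (query : String), Dom_extract_query_entities_py query → Spec_extract_query_entities_py query (extract_query_entities_py query)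

-- ===== LEMMAS AND PROOFS =====

-- tokens seen through A's eyes: "\n" is the boundary marker
def pvOTok (t : List Char) : Option (List Char) := if t = ['\n'] then none else some t

-- a genuine entity token: nonempty, and free of ' ' and '\n'
def pvGoodTok (t : List Char) : Prop := t ≠ [] ∧ ∀ c ∈ t, c ≠ ' ' ∧ c ≠ '\n'

-- what A's flush does to the pending run
def pvFlush (cur : List (List Char)) : List String :=
  if cur ≠ [] then
    (let entity := PySem.Chars.join [' '] cur
     if 1 < entity.length then [String.ofList entity] else [])
  else []

-- entities produced from a token stream, starting with pending run cur
def pvEmit (cur : List (List Char)) : List (Option (List Char)) → List String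
  | [] => pvFlush cur
  | none :: rest => pvFlush cur ++ pvEmit [] rest
  | some t :: rest => pvEmit (cur ++ [t]) rest

-- reference recursion for str.split("\n") with the current segment accumulated in front
def pvSplitNl : List Char → List Char → List (List Char)
  | pre, [] => [pre]
  | pre, c :: r => if c = '\n' then pre :: pvSplitNl [] r else pvSplitNl (pre ++ [c]) r

theorem pvFlush_nil : pvFlush [] = [] := rfl

theorem pvFlush_cases (cur : List (List Char)) : pvFlush cur = [] ∨ ∃ e, pvFlush cur = [e] := by
  unfold pvFlush
  dsimp only
  split_ifs
  · exact Or.inr ⟨_, rfl⟩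
  · exact Or.inl rfl
  · exact Or.inl rfl

theorem pvGT (t : List Char) (h1 : t ≠ []) (h2 : ∀ c ∈ t, c ≠ ' ' ∧ c ≠ '\n') : pvGoodTok t :=
  ⟨h1, h2⟩

theorem pvGoodTok_ne_nl {t : List Char} (h : pvGoodTok t) : t ≠ ['\n'] := by
  intro he
  have h2 := h.2 '\n' (by rw [he]; simp)
  exact h2.2 rfl

theorem pvTitle_cap_good (wl : List Char) (h : wl ∈ pvTitlePrefixes) :
    pvGoodTok (pvCapitalize wl) ∧ pvGoodTok (pvCapitalize wl ++ ['.']) := by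
  fin_cases h
  · exact ⟨pvGT ['D','r','.'] (by simp) (by simp), pvGT ['D','r','.','.'] (by simp) (by simp)⟩
  · exact ⟨pvGT ['M','r','.'] (by simp) (by simp), pvGT ['M','r','.','.'] (by simp) (by simp)⟩
  · exact ⟨pvGT ['M','r','s','.'] (by simp) (by simp), pvGT ['M','r','s','.','.'] (by simp) (by simp)⟩
  · exact ⟨pvGT ['M','s','.'] (by simp) (by simp), pvGT ['M','s','.','.'] (by simp) (by simp)⟩
  · exact ⟨pvGT ['P','r','o','f','.'] (by simp) (by simp), pvGT ['P','r','o','f','.','.'] (by simp) (by simp)⟩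
  · exact ⟨pvGT ['D','r'] (by simp) (by simp), pvGT ['D','r','.'] (by simp) (by simp)⟩
  · exact ⟨pvGT ['M','r'] (by simp) (by simp), pvGT ['M','r','.'] (by simp) (by simp)⟩
  · exact ⟨pvGT ['M','r','s'] (by simp) (by simp), pvGT ['M','r','s','.'] (by simp) (by simp)⟩
  · exact ⟨pvGT ['M','s'] (by simp) (by simp), pvGT ['M','s','.'] (by simp) (by simp)⟩
  · exact ⟨pvGT ['P','r','o','f'] (by simp) (by simp), pvGT ['P','r','o','f','.'] (by simp) (by simp)⟩

theorem pvStepA_eq (es : List String) (cur : List (List Char)) (w : List Char) :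
    pvStepA (es, cur) w =
      match pvOTok (pvTokB w) with
      | some t => (es, cur ++ [t])
      | none => (es ++ pvFlush cur, []) := by
  simp only [pvStepA, pvTokB, pvOTok]
  set wl := pvRstripChars (PySem.Chars.lower w) pvPunct with hwl
  set c0 := PySem.Chars.stripChars w pvPunct with hc0
  set cw := (if PySem.Chars.endswith c0 ['.'] = true ∧ PySem.Chars.lower c0 ∉ pvTitlePrefixes then
      pvRstripChars c0 ['.'] else c0) with hcw
  by_cases h1 : wl ∈ pvTitlePrefixes
  · have hg := pvTitle_cap_good wl h1
    rw [if_pos h1, if_pos h1]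
    by_cases h2 : PySem.Chars.endswith wl ['.'] = true
    · rw [if_pos h2, if_pos h2, if_neg (pvGoodTok_ne_nl hg.1)]
    · rw [if_neg h2, if_neg h2, if_neg (pvGoodTok_ne_nl hg.2)]
  · rw [if_neg h1, if_neg h1]
    by_cases h3 : cw ≠ [] ∧ PySem.Chars.isupper (cw.headD ' ') = true ∧
        PySem.Chars.lower cw ∉ pvStopWords
    · rw [if_pos h3, if_pos h3, if_neg]
      intro he
      have h4 := h3.2.1
      rw [he] at h4
      exact absurd h4 (by decide)
    · rw [if_neg h3, if_neg h3, if_pos rfl]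
      unfold pvFlush
      dsimp only
      by_cases hc : cur = []
      · simp [hc]
      · rw [if_pos hc]
        split_ifs <;> simp

theorem pvFold_emit (ws : List (List Char)) (es : List String) (cur : List (List Char)) :
    (ws.foldl pvStepA (es, cur)).1 ++ pvFlush (ws.foldl pvStepA (es, cur)).2
      = es ++ pvEmit cur (ws.map (fun w => pvOTok (pvTokB w))) := by
  induction ws generalizing es cur with
  | nil => simp [pvEmit]
  | cons w ws ih =>
      simp only [List.foldl_cons, List.map_cons, pvStepA_eq]
      cases h : pvOTok (pvTokB w) with
      | some t => simp [pvEmit, ih]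
      | none => simp [pvEmit, ih, List.append_assoc]

-- equations of PySem.Chars.splitOn.go for the single-char separator "\n"
theorem pvGo_cons (fuel : Nat) (c : Char) (r cur : List Char) (acc : List (List Char)) :
    PySem.Chars.splitOn.go ['\n'] (fuel+1) (c :: r) cur acc =
      if c = '\n' then PySem.Chars.splitOn.go ['\n'] fuel r [] (cur.reverse :: acc)
      else PySem.Chars.splitOn.go ['\n'] fuel r (c :: cur) acc := by
  rw [PySem.Chars.splitOn.go]
  by_cases h : c = '\n'
  · simp [h, List.isPrefixOf]
  · simp [h, List.isPrefixOf]
    exact fun h' => absurd h'.symm h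

theorem pvGo_nil (fuel : Nat) (cur : List Char) (acc : List (List Char)) :
    PySem.Chars.splitOn.go ['\n'] fuel [] cur acc = (cur.reverse :: acc).reverse := by
  cases fuel <;> rw [PySem.Chars.splitOn.go] <;> simp

-- str.split("\n") is pvSplitNl
theorem pvSplitOn_go_eq (l : List Char) : ∀ (fuel : Nat) (cur : List Char) (acc : List (List Char)),
    l.length ≤ fuel →
    PySem.Chars.splitOn.go ['\n'] fuel l cur acc = acc.reverse ++ pvSplitNl cur.reverse l := by
  induction l with
  | nil => intro fuel cur acc _; rw [pvGo_nil]; simp [pvSplitNl]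
  | cons c r ih =>
      intro fuel cur acc hf
      cases fuel with
      | zero => simp at hf
      | succ fuel =>
          rw [pvGo_cons]
          by_cases h : c = '\n'
          · rw [if_pos h, ih fuel [] (cur.reverse :: acc) (by simpa using hf)]
            simp [pvSplitNl, h]
          · rw [if_neg h, ih fuel (c :: cur) acc (by simpa using hf)]
            simp [pvSplitNl, h]

theorem pvSplitOn_eq (s : List Char) : PySem.Chars.splitOn s ['\n'] = pvSplitNl [] s := by
  have := pvSplitOn_go_eq s (s.length + 1) [] [] (by omega)
  simpa [PySem.Chars.splitOn] using this

theorem pvSplitNl_no_nl (pre a : List Char) (h : '\n' ∉ a) : pvSplitNl pre a = [pre ++ a] := by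
  induction a generalizing pre with
  | nil => simp [pvSplitNl]
  | cons c r ih =>
      simp only [List.mem_cons, not_or] at h
      have h1 : c ≠ '\n' := fun hc => h.1 hc.symm
      simp [pvSplitNl, h1, ih _ h.2]

theorem pvSplitNl_append (pre a b : List Char) (h : '\n' ∉ a) :
    pvSplitNl pre (a ++ '\n' :: b) = (pre ++ a) :: pvSplitNl [] b := by
  induction a generalizing pre with
  | nil => simp [pvSplitNl]
  | cons c r ih =>
      simp only [List.mem_cons, not_or] at h
      have h1 : c ≠ '\n' := fun hc => h.1 hc.symm
      simp [pvSplitNl, h1, ih _ h.2]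

-- equations of PySem.Chars.split₀.go
theorem pvS0_nil (cur : List Char) (acc : List (List Char)) :
    PySem.Chars.split₀.go [] cur acc =
      if cur.isEmpty then acc.reverse else (cur.reverse :: acc).reverse := by
  rw [PySem.Chars.split₀.go]

theorem pvS0_cons (c : Char) (r cur : List Char) (acc : List (List Char)) :
    PySem.Chars.split₀.go (c :: r) cur acc =
      if PySem.Chars.isspace c then
        (if cur.isEmpty then PySem.Chars.split₀.go r [] acc
         else PySem.Chars.split₀.go r [] (cur.reverse :: acc))
      else PySem.Chars.split₀.go r (c :: cur) acc := by
  rw [PySem.Chars.split₀.go]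

-- words produced by str.split() contain no whitespace
theorem pvSplit₀_go_no_ws (l : List Char) : ∀ (cur : List Char) (acc : List (List Char)),
    (∀ w ∈ acc, ∀ c ∈ w, PySem.Chars.isspace c = false) →
    (∀ c ∈ cur, PySem.Chars.isspace c = false) →
    ∀ w ∈ PySem.Chars.split₀.go l cur acc, ∀ c ∈ w, PySem.Chars.isspace c = false := by
  induction l with
  | nil =>
      intro cur acc hacc hcur w hw
      rw [pvS0_nil] at hw
      split_ifs at hw <;> simp only [List.mem_reverse, List.mem_cons] at hw
      · exact hacc w hw
      · rcases hw with hw | hw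
        · subst hw; intro c hc; exact hcur c (by simpa using hc)
        · exact hacc w hw
  | cons c r ih =>
      intro cur acc hacc hcur w hw
      rw [pvS0_cons] at hw
      split_ifs at hw with h1 h2
      · exact ih [] acc hacc (by simp) w hw
      · refine ih [] (cur.reverse :: acc) ?_ (by simp) w hw
        intro v hv
        rcases List.mem_cons.1 hv with hv | hv
        · subst hv; intro d hd; exact hcur d (by simpa using hd)
        · exact hacc v hv
      · refine ih (c :: cur) acc hacc ?_ w hw
        intro d hd
        rcases List.mem_cons.1 hd with hd | hd
        · subst hd; simpa using h1
        · exact hcur d hd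

theorem pvSplit₀_no_ws (s : List Char) :
    ∀ w ∈ PySem.Chars.split₀ s, ∀ c ∈ w, PySem.Chars.isspace c = false := by
  exact pvSplit₀_go_no_ws s [] [] (by simp) (by simp)

-- membership through the cleaning primitives
theorem pvMem_rstrip {c : Char} {s chars : List Char} (h : c ∈ pvRstripChars s chars) : c ∈ s := by
  unfold pvRstripChars at h
  rw [List.mem_reverse] at h
  have h2 := (List.dropWhile_sublist _).subset h
  simpa using h2

theorem pvMem_stripChars {c : Char} {s chars : List Char}
    (h : c ∈ PySem.Chars.stripChars s chars) : c ∈ s := by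
  simp only [PySem.Chars.stripChars] at h
  rw [List.mem_reverse] at h
  have h2 := (List.dropWhile_sublist _).subset h
  rw [List.mem_reverse] at h2
  exact (List.dropWhile_sublist _).subset h2

theorem pvNoWs_char {c : Char} (h : PySem.Chars.isspace c = false) : c ≠ ' ' ∧ c ≠ '\n' := by
  constructor <;> rintro rfl <;> simp [PySem.Chars.isspace] at h

theorem pvTokB_good (w : List Char) (h : ∀ c ∈ w, PySem.Chars.isspace c = false) :
    pvTokB w = ['\n'] ∨ pvGoodTok (pvTokB w) := by
  unfold pvTokB
  dsimp only
  by_cases h1 : pvRstripChars (PySem.Chars.lower w) pvPunct ∈ pvTitlePrefixes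
  · have hg := pvTitle_cap_good _ h1
    rw [if_pos h1]
    split_ifs
    · exact Or.inr hg.1
    · exact Or.inr hg.2
  · rw [if_neg h1]
    split_ifs with h2 h3 h4
    · refine Or.inr ⟨h3.1, ?_⟩
      intro c hc
      exact pvNoWs_char (h c (pvMem_stripChars (pvMem_rstrip hc)))
    · exact Or.inl rfl
    · refine Or.inr ⟨h4.1, ?_⟩
      intro c hc
      exact pvNoWs_char (h c (pvMem_stripChars hc))
    · exact Or.inl rfl

-- dropping a fully-matching prefix
theorem pvDropWhile_append_all {p : Char → Bool} (a b : List Char) (ha : ∀ c ∈ a, p c = true) :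
    (a ++ b).dropWhile p = b.dropWhile p := by
  induction a with
  | nil => simp
  | cons c r ih =>
      simp only [List.cons_append, List.dropWhile_cons, ha c (by simp)]
      exact ih fun d hd => ha d (by simp [hd])

-- ' '-stripping recovers the clean core of a segment
theorem pvStrip_spaces (pre j post : List Char) (hpre : ∀ c ∈ pre, c = ' ')
    (hpost : ∀ c ∈ post, c = ' ')
    (hh : ∀ h, j.head? = some h → h ≠ ' ') (hl : ∀ h, j.getLast? = some h → h ≠ ' ') :
    PySem.Chars.stripChars (pre ++ j ++ post) [' '] = j := by
  simp only [PySem.Chars.stripChars]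
  have hpre' : ∀ c ∈ pre, ([' '] : List Char).contains c = true := by
    intro c hc; simp [hpre c hc]
  have hpost' : ∀ c ∈ post, ([' '] : List Char).contains c = true := by
    intro c hc; simp [hpost c hc]
  rw [List.append_assoc, pvDropWhile_append_all pre _ hpre']
  cases j with
  | nil =>
      have hdrop : List.dropWhile (fun c => ([' '] : List Char).contains c) post = [] := by
        rw [List.dropWhile_eq_nil_iff]
        intro c hc
        exact hpost' c hc
      simp [hdrop]
  | cons c0 j' =>
      have hc0 : ([' '] : List Char).contains c0 = false := by
        have := hh c0 rfl; simpa using this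
      simp only [List.cons_append, List.dropWhile_cons, hc0,
        Bool.false_eq_true, if_false]
      rw [show (c0 :: (j' ++ post)) = ((c0 :: j') ++ post) from rfl, List.reverse_append,
        pvDropWhile_append_all post.reverse _ (fun c hc => hpost' c (List.mem_reverse.1 hc))]
      cases hrev : (c0 :: j').reverse with
      | nil => simp at hrev
      | cons d rest =>
          have hd : (c0 :: j').getLast? = some d := by
            rw [← List.head?_reverse, hrev]; rfl
          have pd : ([' '] : List Char).contains d = false := by
            have := hl d hd; simpa using this
          simp only [List.dropWhile_cons, pd, Bool.false_eq_true, if_false]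
          rw [← hrev, List.reverse_reverse]

-- join lemmas
theorem pvJoin_cons (x : List Char) (ys : List (List Char)) (hy : ys ≠ []) :
    PySem.Chars.join [' '] (x :: ys) = x ++ ' ' :: PySem.Chars.join [' '] ys := by
  cases ys with
  | nil => exact absurd rfl hy
  | cons y zs => simp [PySem.Chars.join, List.intercalate, List.intersperse]

theorem pvJoin_append (xs ys : List (List Char)) (hx : xs ≠ []) (hy : ys ≠ []) :
    PySem.Chars.join [' '] (xs ++ ys)
      = PySem.Chars.join [' '] xs ++ ' ' :: PySem.Chars.join [' '] ys := by
  induction xs with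
  | nil => exact absurd rfl hx
  | cons x xs ih =>
      cases xs with
      | nil => simpa using pvJoin_cons x ys hy
      | cons y zs =>
          rw [List.cons_append, pvJoin_cons x ((y :: zs) ++ ys) (by simp),
            pvJoin_cons x (y :: zs) (by simp), ih (by simp)]
          simp

theorem pvJoin_singleton (x : List Char) : PySem.Chars.join [' '] [x] = x := by
  simp [PySem.Chars.join, List.intercalate]

theorem pvJoin_ne_nil (cur : List (List Char)) (hc : ∀ t ∈ cur, pvGoodTok t) (h : cur ≠ []) :
    PySem.Chars.join [' '] cur ≠ [] := by
  cases cur with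
  | nil => exact absurd rfl h
  | cons x ys =>
      cases ys with
      | nil =>
          rw [pvJoin_singleton]
          exact (hc x (by simp)).1
      | cons y zs =>
          rw [pvJoin_cons x (y :: zs) (by simp)]
          rcases hx : x with _ | _ <;> simp_all

theorem pvJoin_no_nl (cur : List (List Char)) (hc : ∀ t ∈ cur, pvGoodTok t) :
    '\n' ∉ PySem.Chars.join [' '] cur := by
  induction cur with
  | nil => simp [PySem.Chars.join, List.intercalate]
  | cons x ys ih =>
      cases ys with
      | nil =>
          rw [pvJoin_singleton]
          intro hm; exact ((hc x (by simp)).2 '\n' hm).2 rfl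
      | cons y zs =>
          rw [pvJoin_cons x (y :: zs) (by simp)]
          intro hm
          rcases List.mem_append.1 hm with hm | hm
          · exact ((hc x (by simp)).2 '\n' hm).2 rfl
          · rcases List.mem_cons.1 hm with hm | hm
            · exact absurd hm.symm (by decide)
            · exact ih (fun t ht => hc t (by simp [ht])) hm

theorem pvJoin_head (cur : List (List Char)) (hc : ∀ t ∈ cur, pvGoodTok t) :
    ∀ h, (PySem.Chars.join [' '] cur).head? = some h → h ≠ ' ' := by
  cases cur with
  | nil => simp [PySem.Chars.join, List.intercalate]
  | cons x ys =>
      intro h hh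
      have hx := hc x (by simp)
      cases x with
      | nil => exact absurd rfl hx.1
      | cons a x' =>
          have hha : h = a := by
            cases ys with
            | nil =>
                rw [pvJoin_singleton] at hh
                simp only [List.head?_cons, Option.some.injEq] at hh
                exact hh.symm
            | cons y zs =>
                rw [pvJoin_cons _ (y :: zs) (by simp), List.cons_append] at hh
                simp only [List.head?_cons, Option.some.injEq] at hh
                exact hh.symm
          subst hha
          exact (hx.2 h (by simp)).1

theorem pvJoin_last (cur : List (List Char)) (hc : ∀ t ∈ cur, pvGoodTok t) :
    ∀ h, (PySem.Chars.join [' '] cur).getLast? = some h → h ≠ ' ' := by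
  induction cur with
  | nil => simp [PySem.Chars.join, List.intercalate]
  | cons x ys ih =>
      intro h hh
      cases ys with
      | nil =>
          rw [pvJoin_singleton] at hh
          have hm : h ∈ x := List.mem_of_getLast? hh
          exact ((hc x (by simp)).2 h hm).1
      | cons y zs =>
          rw [pvJoin_cons _ (y :: zs) (by simp)] at hh
          have hyz : ∀ t ∈ y :: zs, pvGoodTok t := fun t ht => hc t (by simp [ht])
          have hne : PySem.Chars.join [' '] (y :: zs) ≠ [] := pvJoin_ne_nil _ hyz (by simp)
          rw [List.getLast?_append_of_ne_nil _ (by simp)] at hh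
          rw [show (' ' :: PySem.Chars.join [' '] (y :: zs))
              = [' '] ++ PySem.Chars.join [' '] (y :: zs) from rfl,
            List.getLast?_append_of_ne_nil _ hne] at hh
          exact ih hyz h hh

theorem pvSegF_spaces (pre : List Char) (hpre : ∀ c ∈ pre, c = ' ') : pvSegF pre = none := by
  unfold pvSegF
  have hstr : PySem.Chars.stripChars (pre ++ [] ++ []) [' '] = [] :=
    pvStrip_spaces pre [] [] hpre (by simp) (by simp) (by simp)
  simp only [List.append_nil] at hstr
  simp [hstr]

theorem pvSeg_run (pre : List Char) (cur : List (List Char)) (hpre : ∀ c ∈ pre, c = ' ')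
    (hcur : ∀ t ∈ cur, pvGoodTok t) (post : List Char) (hpost : ∀ c ∈ post, c = ' ') :
    pvSegF (pre ++ PySem.Chars.join [' '] cur ++ post) =
      match pvFlush cur with
      | [] => none
      | e :: _ => some e := by
  unfold pvSegF pvFlush
  dsimp only
  rw [pvStrip_spaces pre _ post hpre hpost (pvJoin_head cur hcur) (pvJoin_last cur hcur)]
  by_cases hc : cur = []
  · subst hc
    simp
  · rw [if_pos hc]
    split_ifs <;> rfl

-- the heart of the equivalence: splitting the sentinel string emits exactly A's runs
theorem pvSplit_emit (toks : List (List Char)) :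
    ∀ (cur : List (List Char)) (pre : List Char), (∀ c ∈ pre, c = ' ') →
    (∀ t ∈ cur, pvGoodTok t) → (∀ t ∈ toks, t = ['\n'] ∨ pvGoodTok t) →
    (pvSplitNl pre (PySem.Chars.join [' '] (cur ++ toks))).filterMap pvSegF
      = pvEmit cur (toks.map pvOTok) := by
  induction toks with
  | nil =>
      intro cur pre hpre hcur _
      rw [List.append_nil, pvSplitNl_no_nl pre _ (pvJoin_no_nl cur hcur)]
      have hseg := pvSeg_run pre cur hpre hcur [] (by simp)
      rw [List.append_nil] at hseg
      simp only [List.filterMap_cons, List.filterMap_nil, List.map_nil, pvEmit]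
      rcases pvFlush_cases cur with hf | ⟨e, hf⟩ <;> rw [hf] at hseg ⊢ <;> simp [hseg]
  | cons t rest ih =>
      intro cur pre hpre hcur htoks
      have htoks' : ∀ t' ∈ rest, t' = ['\n'] ∨ pvGoodTok t' :=
        fun t' ht' => htoks t' (by simp [ht'])
      rcases htoks t (by simp) with ht | ht
      · subst ht
        have htail : (pvSplitNl []
            (if rest = [] then [] else ' ' :: PySem.Chars.join [' '] rest)).filterMap pvSegF
            = pvEmit [] (rest.map pvOTok) := by
          cases rest with
          | nil =>
              simp only [List.map_nil, pvEmit, pvFlush_nil]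
              simp [pvSplitNl, pvSegF_spaces [] (by simp)]
          | cons u rs =>
              have hih := ih [] [' '] (by simp) (by simp) htoks'
              rw [List.nil_append] at hih
              rw [if_neg (by simp)]
              have hstep : pvSplitNl [] (' ' :: PySem.Chars.join [' '] (u :: rs))
                  = pvSplitNl [' '] (PySem.Chars.join [' '] (u :: rs)) := by
                simp [pvSplitNl]
              rw [hstep]
              exact hih
        have hjoin : PySem.Chars.join [' '] (cur ++ ['\n'] :: rest)
            = (PySem.Chars.join [' '] cur ++ (if cur = [] then [] else [' '])) ++ '\n'
              :: (if rest = [] then [] else ' ' :: PySem.Chars.join [' '] rest) := by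
          by_cases hc : cur = []
          · subst hc
            cases rest with
            | nil => simp [PySem.Chars.join, List.intercalate]
            | cons u rs =>
                rw [List.nil_append, pvJoin_cons ['\n'] (u :: rs) (by simp)]
                simp
          · rw [pvJoin_append cur (['\n'] :: rest) hc (by simp)]
            cases rest with
            | nil => rw [pvJoin_singleton]; simp [hc]
            | cons u rs => rw [pvJoin_cons ['\n'] (u :: rs) (by simp)]; simp [hc]
        have hnl : '\n' ∉ PySem.Chars.join [' '] cur ++ (if cur = [] then [] else [' ']) := by
          intro hm
          rcases List.mem_append.1 hm with hm | hm
          · exact pvJoin_no_nl cur hcur hm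
          · split_ifs at hm <;> simp_all
        have hseg : pvSegF (pre ++ (PySem.Chars.join [' '] cur ++ (if cur = [] then [] else [' '])))
            = match pvFlush cur with | [] => none | e :: _ => some e := by
          have := pvSeg_run pre cur hpre hcur (if cur = [] then [] else [' '])
            (by split_ifs <;> simp)
          rw [List.append_assoc] at this
          exact this
        rw [hjoin, pvSplitNl_append _ _ _ hnl, List.filterMap_cons, hseg, htail]
        simp only [List.map_cons, pvOTok]
        rcases pvFlush_cases cur with hf | ⟨e, hf⟩ <;> simp [pvEmit, hf]
      · have hne : t ≠ ['\n'] := pvGoodTok_ne_nl ht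
        have hcur' : ∀ t' ∈ cur ++ [t], pvGoodTok t' := by
          intro t' ht'
          rcases List.mem_append.1 ht' with h' | h'
          · exact hcur t' h'
          · have he : t' = t := by simpa using h'
            rw [he]; exact ht
        have hstep : cur ++ t :: rest = (cur ++ [t]) ++ rest := by simp
        rw [hstep, ih (cur ++ [t]) pre hpre hcur' htoks']
        simp [pvEmit, pvOTok, hne]

-- ===== VERDICT (by name: the statement is the Claim_ definition above) =====
theorem extract_query_entities_py_spec : Claim_equal_extract_query_entities_py := by
  intro query _
  unfold Spec_extract_query_entities_py extract_query_entities_py extract_query_entities_py_alt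
  by_cases h : query.toList = []
  · rw [if_pos h, h]
    rfl
  · rw [if_neg h]
    dsimp only
    rw [pvSplitOn_eq]
    have hws := pvSplit₀_no_ws query.toList
    have htoks : ∀ t ∈ (PySem.Chars.split₀ query.toList).map pvTokB,
        t = ['\n'] ∨ pvGoodTok t := by
      intro t ht
      obtain ⟨w, hw, rfl⟩ := List.mem_map.1 ht
      exact pvTokB_good w (hws w hw)
    have hmain := pvSplit_emit ((PySem.Chars.split₀ query.toList).map pvTokB) [] []
      (by simp) (by simp) htoks
    rw [List.nil_append] at hmain
    rw [hmain, List.map_map]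
    have hA := pvFold_emit (PySem.Chars.split₀ query.toList) [] []
    rw [List.nil_append] at hA
    simp only [Function.comp_def]
    rw [← hA]
    unfold pvFlush
    dsimp only
    split_ifs <;> simp_all
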